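-- pv_equiv track=rewrite | github.com/filips/video-convert | convert.py | getCorrectedTime
-- ===== SOURCE A (Python) =====
-- def getCorrectedTime(time, remSecs):
--     """Correct timestamps for removed sections in the video file"""
--     newTime = time
--     for remSec in remSecs:
--         if time >= remSec['end']:
--             newTime -= remSec['end'] - remSec['start']
--         elif time > remSec['start']:
--             return None
--     return newTime
-- ===== SOURCE B (Python) =====
-- def getCorrectedTime(time, remSecs):
--     """Correct timestamps for removed sections in the video file"""
--     ordered = sorted(remSecs, key=lambda s: s['end'])
--     removed = 0
--     i = 0
--     # sections ending at or before `time` are wholly removed before it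
--     while i < len(ordered) and ordered[i]['end'] <= time:
--         removed += ordered[i]['end'] - ordered[i]['start']
--         i += 1
--     # every remaining section ends after `time`; `time` sits inside one iff it starts before `time`
--     while i < len(ordered):
--         if ordered[i]['start'] < time:
--             return None
--         i += 1
--     return time - removed
-- ===== Notes on version B (the rewrite author's own statement) =====
-- stated objective: alternative
-- what changed: B sorts the sections by their end time and splits the sorted list at `time`: it accumulates removed lengths over the prefix ending at or before `time`, then decides the None case on the suffix using only the start (the sortedness invariant makes the end comparison unnecessary there), instead of A's single unsorted pass that tests both bounds of every section.
-- outside the precondition, e.g. on getCorrectedTime(1, [{'start': 0, 'end': 2}, {}]): A returns None, B raises KeyError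
import Mathlib
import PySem

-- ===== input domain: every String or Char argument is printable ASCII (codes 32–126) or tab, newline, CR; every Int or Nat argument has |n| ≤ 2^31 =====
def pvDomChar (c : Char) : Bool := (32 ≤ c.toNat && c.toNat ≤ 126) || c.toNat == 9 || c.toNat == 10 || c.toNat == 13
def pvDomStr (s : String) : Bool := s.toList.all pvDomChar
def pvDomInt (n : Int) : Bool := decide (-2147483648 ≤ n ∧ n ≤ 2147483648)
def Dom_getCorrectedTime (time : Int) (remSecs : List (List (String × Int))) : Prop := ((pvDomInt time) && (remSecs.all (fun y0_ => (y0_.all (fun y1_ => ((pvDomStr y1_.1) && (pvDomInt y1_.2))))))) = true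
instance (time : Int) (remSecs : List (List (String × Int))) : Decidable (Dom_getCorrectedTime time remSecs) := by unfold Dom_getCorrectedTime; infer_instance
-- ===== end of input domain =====

-- B sorts the sections by end time and splits the sorted list at `time` (prefix: sum the
-- removed lengths; suffix: the None test needs only the start), instead of A's unsorted
-- single pass; same result, different algorithm, not claimed faster.

-- shared dict lookups: remSec['end'] / remSec['start'] (getD 0 is unreachable under Pre_)
def pvEndOf (s : List (String × Int)) : Int := (PySem.Dict.get? (PySem.Dict.mk s) "end").getD 0
def pvStartOf (s : List (String × Int)) : Int := (PySem.Dict.get? (PySem.Dict.mk s) "start").getD 0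

-- ===== PORT A =====
-- A's for-loop, carrying the mutable accumulator newTime
def getCorrectedTimeLoopA (time : Int) : Int → List (List (String × Int)) → Option Int
  | newTime, [] => some newTime
  | newTime, s :: rest =>
      if pvEndOf s ≤ time then getCorrectedTimeLoopA time (newTime - (pvEndOf s - pvStartOf s)) rest
      else if pvStartOf s < time then none
      else getCorrectedTimeLoopA time newTime rest

def getCorrectedTime (time : Int) (remSecs : List (List (String × Int))) : Option Int :=
  getCorrectedTimeLoopA time time remSecs

-- ===== PORT B =====
-- B's first while-loop: consume sections with end <= time, summing their lengths;
-- returns (removed, remaining sections)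
def bLoop1 (time : Int) : Int → List (List (String × Int)) → Int × List (List (String × Int))
  | removed, [] => (removed, [])
  | removed, s :: rest =>
      if pvEndOf s ≤ time then bLoop1 time (removed + (pvEndOf s - pvStartOf s)) rest
      else (removed, s :: rest)

-- B's second while-loop: does any remaining section start before `time`?
def bLoop2 (time : Int) : List (List (String × Int)) → Bool
  | [] => false
  | s :: rest => if pvStartOf s < time then true else bLoop2 time rest

def getCorrectedTime_alt (time : Int) (remSecs : List (List (String × Int))) : Option Int :=
  let ordered := PySem.List.sorted remSecs (fun s => pvEndOf s) false
  let r := bLoop1 time 0 ordered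
  if bLoop2 time r.2 then none else some (time - r.1)

-- ===== PRECONDITION & SPEC =====
-- Pre_ requires every section to carry both 'start' and 'end' keys. It excludes (a) the
-- inputs where A itself raises KeyError, and (b) inputs where a malformed section follows
-- one that makes A return None early: there A returns None but B's sort-key lookup raises
-- KeyError, so B cannot match (see the cite in claim.json).
def Pre_getCorrectedTime (time : Int) (remSecs : List (List (String × Int))) : Prop :=
  remSecs.all (fun s => (PySem.Dict.get? (PySem.Dict.mk s) "start").isSome &&
                        (PySem.Dict.get? (PySem.Dict.mk s) "end").isSome) = true
instance (time : Int) (remSecs : List (List (String × Int))) : Decidable (Pre_getCorrectedTime time remSecs) := by unfold Pre_getCorrectedTime; infer_instance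

def pvWitness_getCorrectedTime : Int × (List (List (String × Int))) :=
  (1, [[("start", 0), ("end", 2)]])

def Spec_getCorrectedTime (time : Int) (remSecs : List (List (String × Int))) (out : Option Int) : Prop := out = getCorrectedTime_alt time remSecs
instance (time : Int) (remSecs : List (List (String × Int))) (out : Option Int) : Decidable (Spec_getCorrectedTime time remSecs out) := by unfold Spec_getCorrectedTime; infer_instance

-- ===== CLAIM (what is proved, stated in full; the proofs are below) =====
def Claim_equal_getCorrectedTime : Prop := ∀ (time : Int) (remSecs : List (List (String × Int))), Dom_getCorrectedTime time remSecs → Pre_getCorrectedTime time remSecs → Spec_getCorrectedTime time remSecs (getCorrectedTime time remSecs)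

-- ===== LEMMAS AND PROOFS =====

-- A's loop computes: None if time is strictly inside some section, else nt minus the
-- lengths of the sections ending at or before time (in list order).
theorem loopA_eq (time : Int) (l : List (List (String × Int))) :
    ∀ nt : Int, getCorrectedTimeLoopA time nt l =
      if l.any (fun s => decide (pvStartOf s < time) && decide (time < pvEndOf s)) then none
      else some (nt - ((l.filter (fun s => decide (pvEndOf s ≤ time))).map
                        (fun s => pvEndOf s - pvStartOf s)).sum) := by
  induction l with
  | nil => intro nt; simp [getCorrectedTimeLoopA]
  | cons s rest ih =>
      intro nt
      simp only [getCorrectedTimeLoopA, List.any_cons, List.filter_cons]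
      by_cases he : pvEndOf s ≤ time
      · have hne : ¬ (time < pvEndOf s) := by omega
        simp [he, hne, ih]
        split_ifs <;> simp <;> omega
      · by_cases hs : pvStartOf s < time
        · simp [he, hs]
        · simp [he, hs, ih]

-- B's first loop is takeWhile/dropWhile with the summed lengths
theorem bLoop1_eq (time : Int) (l : List (List (String × Int))) :
    ∀ acc : Int, bLoop1 time acc l =
      (acc + ((l.takeWhile (fun s => decide (pvEndOf s ≤ time))).map
                (fun s => pvEndOf s - pvStartOf s)).sum,
       l.dropWhile (fun s => decide (pvEndOf s ≤ time))) := by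
  induction l with
  | nil => intro acc; simp [bLoop1]
  | cons s rest ih =>
      intro acc
      by_cases he : pvEndOf s ≤ time
      · simp [bLoop1, he, List.takeWhile_cons, List.dropWhile_cons, ih]; ring
      · simp [bLoop1, he, List.takeWhile_cons, List.dropWhile_cons]

-- B's second loop is `any`
theorem bLoop2_eq (time : Int) (l : List (List (String × Int))) :
    bLoop2 time l = l.any (fun s => decide (pvStartOf s < time)) := by
  induction l with
  | nil => simp [bLoop2]
  | cons s rest ih =>
      by_cases hs : pvStartOf s < time <;> simp [bLoop2, hs, ih]

-- on a list sorted by pvEndOf, takeWhile (end ≤ time) is filter (end ≤ time)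
theorem takeWhile_eq_filter_of_sorted (time : Int) :
    ∀ l : List (List (String × Int)), l.Pairwise (fun a b => pvEndOf a ≤ pvEndOf b) →
      l.takeWhile (fun s => decide (pvEndOf s ≤ time)) =
        l.filter (fun s => decide (pvEndOf s ≤ time)) := by
  intro l hl
  induction hl with
  | nil => simp
  | cons hab _ ih =>
      rename_i a rest _
      by_cases he : pvEndOf a ≤ time
      · simp [List.takeWhile_cons, List.filter_cons, he, ih]
      · have : ∀ s ∈ rest, ¬ (pvEndOf s ≤ time) := fun s hs => by have := hab s hs; omega
        simp [List.takeWhile_cons, List.filter_cons, he]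
        intro s hs; have := this s hs; omega

-- on a list sorted by pvEndOf, dropWhile (end ≤ time) is filter (¬ end ≤ time)
theorem dropWhile_eq_filter_of_sorted (time : Int) :
    ∀ l : List (List (String × Int)), l.Pairwise (fun a b => pvEndOf a ≤ pvEndOf b) →
      l.dropWhile (fun s => decide (pvEndOf s ≤ time)) =
        l.filter (fun s => !decide (pvEndOf s ≤ time)) := by
  intro l hl
  induction hl with
  | nil => simp
  | cons hab _ ih =>
      rename_i a rest _
      by_cases he : pvEndOf a ≤ time
      · simp [List.dropWhile_cons, List.filter_cons, he, ih]
      · have : ∀ s ∈ rest, ¬ (pvEndOf s ≤ time) := fun s hs => by have := hab s hs; omega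
        simp [List.dropWhile_cons, List.filter_cons, he]
        exact (List.filter_eq_self.mpr (fun s hs => by simp [this s hs])).symm

-- ===== VERDICT (by name: the statement is the Claim_ definition above) =====
theorem getCorrectedTime_spec : Claim_equal_getCorrectedTime := by
  intro time remSecs _ _
  unfold Spec_getCorrectedTime getCorrectedTime getCorrectedTime_alt
  rw [loopA_eq]
  have hperm : (PySem.List.sorted remSecs (fun s => pvEndOf s) false).Perm remSecs :=
    PySem.List.sorted_perm _ _ _
  have hpw : (PySem.List.sorted remSecs (fun s => pvEndOf s) false).Pairwise
      (fun a b => pvEndOf a ≤ pvEndOf b) := PySem.List.sorted_pairwise _ _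
  have hany : ((PySem.List.sorted remSecs (fun s => pvEndOf s) false).filter
        (fun s => !decide (pvEndOf s ≤ time))).any (fun s => decide (pvStartOf s < time)) =
      remSecs.any (fun s => decide (pvStartOf s < time) && decide (time < pvEndOf s)) := by
    simp only [List.any_filter]
    rw [hperm.any_eq]
    have hfun : (fun s => (!decide (pvEndOf s ≤ time)) && decide (pvStartOf s < time)) =
        (fun s : List (String × Int) => decide (pvStartOf s < time) && decide (time < pvEndOf s)) := by
      funext s
      by_cases h1 : pvEndOf s ≤ time <;> by_cases h2 : pvStartOf s < time <;>
        simp [h1, h2] <;> omega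
    rw [hfun]
  have hsum : (((PySem.List.sorted remSecs (fun s => pvEndOf s) false).filter
        (fun s => decide (pvEndOf s ≤ time))).map (fun s => pvEndOf s - pvStartOf s)).sum =
      ((remSecs.filter (fun s => decide (pvEndOf s ≤ time))).map
        (fun s => pvEndOf s - pvStartOf s)).sum :=
    ((hperm.filter _).map _).sum_eq
  simp only [bLoop1_eq, bLoop2_eq,
    takeWhile_eq_filter_of_sorted time _ hpw, dropWhile_eq_filter_of_sorted time _ hpw,
    hany, hsum, zero_add]
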